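-- pv_equiv track=rewrite | github.com/lynn/kumdor | sprite_view.py | threebpp
-- ===== SOURCE A (Python) =====
-- def onebpp(bs, width=64, height=64):
--     rows = []
--     for y in range(height):
--         row = []
--         for x in range(width // 8):
--             for b in range(8):
--                 bit = bs[width // 8 * y + x] >> (7 - b) & 1
--                 row.append(bit)
--         rows.append(row)
--
--     return rows
--
-- def threebpp(bs, width=64, height=64):
--     ir = onebpp(bs, width, height)
--     ig = onebpp(bs[width // 8 * height :], width, height)
--     ib = onebpp(bs[width // 8 * height * 2 :], width, height)
--     return [
--         [r + 2 * g + 4 * b for r, g, b in zip(lr, lg, lb)]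
--         for lr, lg, lb in zip(ir, ig, ib)
--     ]
-- ===== SOURCE B (Python) =====
-- def threebpp(bs, width=64, height=64):
--     # One fused pass: compute each pixel's 3-bit color index directly from the
--     # three plane bytes, no intermediate 1-bpp grids, no slicing, no zip.
--     w8 = width // 8
--     off = w8 * height
--     rows = []
--     for y in range(height):
--         row = []
--         for x in range(w8):
--             i = w8 * y + x
--             br = bs[i]
--             bg = bs[off + i]
--             bb = bs[2 * off + i]
--             for k in range(7, -1, -1):
--                 row.append((br >> k & 1) + 2 * (bg >> k & 1) + 4 * (bb >> k & 1))
--         rows.append(row)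
--     return rows
-- ===== Notes on version B (the rewrite author's own statement) =====
-- stated objective: simpler
-- what changed: B computes each pixel's 3-bit color index directly in one fused y/x/bit triple loop reading the three plane bytes by offset, instead of decoding three separate 1-bpp grids via a helper and zipping them together.
import Mathlib
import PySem

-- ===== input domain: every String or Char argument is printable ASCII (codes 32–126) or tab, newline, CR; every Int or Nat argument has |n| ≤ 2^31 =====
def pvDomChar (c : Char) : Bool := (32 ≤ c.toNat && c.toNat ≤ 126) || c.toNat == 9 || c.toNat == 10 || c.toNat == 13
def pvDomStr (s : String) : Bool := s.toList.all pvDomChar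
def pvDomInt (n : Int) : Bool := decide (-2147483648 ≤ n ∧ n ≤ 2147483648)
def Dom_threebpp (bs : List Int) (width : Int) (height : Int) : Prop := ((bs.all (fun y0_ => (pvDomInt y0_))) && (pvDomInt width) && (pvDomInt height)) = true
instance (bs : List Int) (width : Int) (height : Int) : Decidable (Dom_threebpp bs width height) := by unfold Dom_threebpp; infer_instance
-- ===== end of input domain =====

-- B fuses the three plane decodes and the zip into one direct triple loop per pixel (objective: simpler).

-- ===== PORT A =====
-- onebpp(bs, width, height): decode one 1-bpp plane (helper of A, transliterated)
def onebppA (bs : List Int) (width : Int) (height : Int) : List (List Int) :=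
  (PySem.List.pyRange 0 height 1).foldl (fun rows y =>
    rows ++ [((PySem.List.pyRange 0 (PySem.Int.floordiv width 8) 1).foldl (fun row x =>
      (PySem.List.pyRange 0 8 1).foldl (fun row b =>
        -- bit = bs[width//8*y+x] >> (7-b) & 1  (Python '>>' = '>>>', '& 1' = PySem.Int.band · 1)
        row ++ [PySem.Int.band
          (PySem.List.pyGetD bs (PySem.Int.floordiv width 8 * y + x) 0 >>> (7 - b).toNat) 1]) row) [])]) []

def threebpp (bs : List Int) (width : Int) (height : Int) : List (List Int) :=
  let ir := onebppA bs width height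
  let ig := onebppA (PySem.List.slice bs (some (PySem.Int.floordiv width 8 * height)) none) width height
  let ib := onebppA (PySem.List.slice bs (some (PySem.Int.floordiv width 8 * height * 2)) none) width height
  (ir.zip (ig.zip ib)).map (fun p =>
    (p.1.zip (p.2.1.zip p.2.2)).map (fun q => q.1 + 2 * q.2.1 + 4 * q.2.2))

-- ===== PORT B =====
def threebpp_alt (bs : List Int) (width : Int) (height : Int) : List (List Int) :=
  let w8 := PySem.Int.floordiv width 8
  let off := w8 * height
  (PySem.List.pyRange 0 height 1).foldl (fun rows y =>
    rows ++ [((PySem.List.pyRange 0 w8 1).foldl (fun row x =>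
      let i := w8 * y + x
      let br := PySem.List.pyGetD bs i 0
      let bg := PySem.List.pyGetD bs (off + i) 0
      let bb := PySem.List.pyGetD bs (2 * off + i) 0
      (PySem.List.pyRange 7 (-1) (-1)).foldl (fun row k =>
        row ++ [PySem.Int.band (br >>> k.toNat) 1 + 2 * PySem.Int.band (bg >>> k.toNat) 1
                 + 4 * PySem.Int.band (bb >>> k.toNat) 1]) row) [])]) []

-- ===== PRECONDITION & SPEC =====
-- Pre_ excludes exactly the inputs where Python A raises IndexError: when pixels are
-- actually read (width//8 > 0 and height > 0), bs must hold all three planes.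
def Pre_threebpp (bs : List Int) (width : Int) (height : Int) : Prop :=
  PySem.Int.floordiv width 8 ≤ 0 ∨ height ≤ 0 ∨
    3 * (PySem.Int.floordiv width 8 * height) ≤ (bs.length : Int)
instance (bs : List Int) (width : Int) (height : Int) : Decidable (Pre_threebpp bs width height) := by
  unfold Pre_threebpp; infer_instance

def pvWitness_threebpp : List Int × Int × Int := ([255, 0, 128], 8, 1)

def Spec_threebpp (bs : List Int) (width : Int) (height : Int) (out : List (List Int)) : Prop := out = threebpp_alt bs width height
instance (bs : List Int) (width : Int) (height : Int) (out : List (List Int)) : Decidable (Spec_threebpp bs width height out) := by unfold Spec_threebpp; infer_instance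

-- ===== CLAIM (what is proved, stated in full; the proofs are below) =====
def Claim_equal_threebpp : Prop := ∀ (bs : List Int) (width : Int) (height : Int), Dom_threebpp bs width height → Pre_threebpp bs width height → Spec_threebpp bs width height (threebpp bs width height)

-- ===== LEMMAS AND PROOFS =====

-- the bit a plane read yields
def pvBit (bs : List Int) (idx k : Int) : Int :=
  PySem.Int.band (PySem.List.pyGetD bs idx 0 >>> k) 1

lemma onebppA_eq_map (bs : List Int) (width height : Int) :
    onebppA bs width height =
      (PySem.List.pyRange 0 height 1).map (fun y =>
        (PySem.List.pyRange 0 (PySem.Int.floordiv width 8) 1).flatMap (fun x =>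
          (List.range 8).map (fun j =>
            pvBit bs (PySem.Int.floordiv width 8 * y + x) (7 - (j : Int))))) := by
  have h8 : PySem.List.pyRange 0 8 1 = [0, 1, 2, 3, 4, 5, 6, 7] := by decide
  unfold onebppA
  simp only [PySem.List.foldl_append_singleton_eq_map, PySem.List.foldl_append_eq_flatMap,
    List.nil_append, h8, pvBit]
  norm_num [List.range_succ]

lemma alt_eq_map (bs : List Int) (width height : Int) :
    threebpp_alt bs width height =
      (PySem.List.pyRange 0 height 1).map (fun y =>
        (PySem.List.pyRange 0 (PySem.Int.floordiv width 8) 1).flatMap (fun x =>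
          (List.range 8).map (fun j =>
            pvBit bs (PySem.Int.floordiv width 8 * y + x) (7 - (j : Int))
              + 2 * pvBit bs (PySem.Int.floordiv width 8 * height + (PySem.Int.floordiv width 8 * y + x)) (7 - (j : Int))
              + 4 * pvBit bs (2 * (PySem.Int.floordiv width 8 * height) + (PySem.Int.floordiv width 8 * y + x)) (7 - (j : Int))))) := by
  have h8 : PySem.List.pyRange 7 (-1) (-1) = [7, 6, 5, 4, 3, 2, 1, 0] := by decide
  unfold threebpp_alt
  simp only [PySem.List.foldl_append_singleton_eq_map, PySem.List.foldl_append_eq_flatMap,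
    List.nil_append, h8, pvBit]
  norm_num [List.range_succ]

lemma zip_flatMap_of_len {α β γ : Type} (l : List α) (f : α → List β) (g : α → List γ)
    (h : ∀ x ∈ l, (f x).length = (g x).length) :
    (l.flatMap f).zip (l.flatMap g) = l.flatMap (fun x => (f x).zip (g x)) := by
  induction l with
  | nil => rfl
  | cons a l ih =>
      simp only [List.flatMap_cons]
      rw [List.zip_append (by rw [h a (by simp)]), ih (fun x hx => h x (by simp [hx]))]

lemma pyGetD_drop (bs : List Int) (n : Nat) (i : Int) (hi : 0 ≤ i) :
    PySem.List.pyGetD (bs.drop n) i 0 = PySem.List.pyGetD bs ((n : Int) + i) 0 := by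
  have h1 : i = ((i.toNat : Nat) : Int) := by omega
  have h2 : (n : Int) + i = (((n + i.toNat : Nat)) : Int) := by omega
  rw [h2, h1, PySem.List.pyGetD_natCast, PySem.List.pyGetD_natCast]
  simp [List.getD, List.getElem?_drop]
  congr 2
  omega

-- ===== VERDICT (by name: the statement is the Claim_ definition above) =====
theorem threebpp_spec : Claim_equal_threebpp := by
  intro bs width height _ _
  unfold Spec_threebpp threebpp
  rw [alt_eq_map, onebppA_eq_map, onebppA_eq_map, onebppA_eq_map]
  simp only [List.zip_map', List.map_map]
  apply List.map_congr_left
  intro y hy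
  rw [PySem.List.mem_pyRange_one] at hy
  simp only [Function.comp]
  rw [zip_flatMap_of_len _ _ _ (by intro x _; simp),
    zip_flatMap_of_len _ _ _ (by intro x _; simp [List.length_zip]),
    List.map_flatMap]
  apply List.flatMap_congr
  intro x hx
  rw [PySem.List.mem_pyRange_one] at hx
  have hw8 : 0 < PySem.Int.floordiv width 8 := by omega
  have hoff : 0 ≤ PySem.Int.floordiv width 8 * height := by
    have h0 : (0:Int) ≤ height := by omega
    exact mul_nonneg (by omega) h0
  have hoff2 : 0 ≤ PySem.Int.floordiv width 8 * height * 2 := by omega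
  have hi : 0 ≤ PySem.Int.floordiv width 8 * y + x := by
    have := mul_nonneg (le_of_lt hw8) hy.1
    omega
  rw [List.zip_map', List.zip_map', List.map_map]
  apply List.map_congr_left
  intro j _
  simp only [Function.comp, pvBit, PySem.List.slice_from bs hoff, PySem.List.slice_from bs hoff2,
    pyGetD_drop _ _ _ hi, Int.toNat_of_nonneg hoff, Int.toNat_of_nonneg hoff2]
  ring_nf
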